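-- pv_equiv track=rewrite | github.com/Abdul-Omira/cad-fusion-lab | src/data/data_augmentation.py | _style_variation
-- ===== SOURCE A (Python) =====
-- def _style_variation(text: str) -> str:
--     """Create style variations (formal/informal)."""
--     # Simple style transformations
--     formal_replacements = {
--         "it's": "it is",
--         "don't": "do not",
--         "can't": "cannot",
--         "won't": "will not"
--     }
--
--     result = text
--     for informal, formal in formal_replacements.items():
--         result = result.replace(informal, formal)
--
--     return result
-- ===== SOURCE B (Python) =====
-- def _style_variation(text: str) -> str:
--     """Create style variations (formal/informal) in a single left-to-right scan."""
--     formal_replacements = {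
--         "it's": "it is",
--         "don't": "do not",
--         "can't": "cannot",
--         "won't": "will not"
--     }
--     items = list(formal_replacements.items())
--     out = []
--     i = 0
--     n = len(text)
--     while i < n:
--         for informal, formal in items:
--             if text.startswith(informal, i):
--                 out.append(formal)
--                 i += len(informal)
--                 break
--         else:
--             out.append(text[i])
--             i += 1
--     return "".join(out)
-- ===== Notes on version B (the rewrite author's own statement) =====
-- stated objective: alternative
-- what changed: Replaced A's four sequential full-text str.replace passes with a single left-to-right scan that tries the four informal keys at each position and emits the formal expansion or copies one character.
import Mathlib
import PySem

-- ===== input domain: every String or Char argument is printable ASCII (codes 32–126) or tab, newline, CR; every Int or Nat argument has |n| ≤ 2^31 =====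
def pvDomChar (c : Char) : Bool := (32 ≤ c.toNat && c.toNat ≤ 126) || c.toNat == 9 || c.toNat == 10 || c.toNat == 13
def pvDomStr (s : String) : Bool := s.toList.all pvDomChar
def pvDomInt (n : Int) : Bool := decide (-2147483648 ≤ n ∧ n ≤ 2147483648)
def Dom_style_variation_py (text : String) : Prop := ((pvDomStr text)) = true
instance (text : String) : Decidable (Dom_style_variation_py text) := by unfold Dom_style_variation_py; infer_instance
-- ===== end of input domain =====

set_option maxRecDepth 4096

-- B replaces A's four sequential full-text str.replace passes with a single left-to-right scan
-- of the text (objective: alternative — one traversal instead of four, same exact output).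

-- ===== PORT A =====
def style_variation_py (text : String) : String :=
  -- the Python dict literal, iterated in insertion order
  let formal_replacements : List (String × String) :=
    [("it's", "it is"), ("don't", "do not"), ("can't", "cannot"), ("won't", "will not")]
  formal_replacements.foldl (fun result kv => PySem.Str.replace result kv.1 kv.2) text

-- ===== PORT B =====
-- B's single pass: at each position try the four informal keys in dict order; on a match emit
-- the formal expansion and jump past the key, otherwise copy one character.
def pvScan : List Char → List Char
  | [] => []
  | c :: t =>
    if ['i','t','\'','s'].isPrefixOf (c :: t) then
      ['i','t',' ','i','s'] ++ pvScan (t.drop 3)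
    else if ['d','o','n','\'','t'].isPrefixOf (c :: t) then
      ['d','o',' ','n','o','t'] ++ pvScan (t.drop 4)
    else if ['c','a','n','\'','t'].isPrefixOf (c :: t) then
      ['c','a','n','n','o','t'] ++ pvScan (t.drop 4)
    else if ['w','o','n','\'','t'].isPrefixOf (c :: t) then
      ['w','i','l','l',' ','n','o','t'] ++ pvScan (t.drop 4)
    else c :: pvScan t
termination_by l => l.length
decreasing_by all_goals (simp only [List.length_drop, List.length_cons]; omega)


def style_variation_py_alt (text : String) : String := String.ofList (pvScan text.toList)

-- ===== PRECONDITION & SPEC =====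
def Spec_style_variation_py (text : String) (out : String) : Prop := out = style_variation_py_alt text
instance (text : String) (out : String) : Decidable (Spec_style_variation_py text out) := by unfold Spec_style_variation_py; infer_instance

-- ===== CLAIM (what is proved, stated in full; the proofs are below) =====
def Claim_equal_style_variation_py : Prop := ∀ (text : String), Dom_style_variation_py text → Spec_style_variation_py text (style_variation_py text)

-- ===== LEMMAS AND PROOFS =====
-- pvRepl is a direct structural model of PySem.Chars.replace (one key, left-to-right);
-- pvScanEq shows B's single scan equals the composition of the four single-key passes,
-- using that no key starts with another key's head character and each replacement value
-- starts with its own key's head character.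

def pvRepl (old new : List Char) : List Char → List Char
  | [] => []
  | c :: t =>
    if old.isPrefixOf (c :: t) then new ++ pvRepl old new (t.drop (old.length - 1))
    else c :: pvRepl old new t
termination_by l => l.length
decreasing_by
  · simp only [List.length_drop, List.length_cons]; omega
  · simp

lemma pvRepl_nil (old new : List Char) : pvRepl old new [] = [] := by
  rw [pvRepl]

lemma pvRepl_cons (old new : List Char) (c : Char) (t : List Char) :
    pvRepl old new (c :: t) =
      if old.isPrefixOf (c :: t) then new ++ pvRepl old new (t.drop (old.length - 1))
      else c :: pvRepl old new t := by
  rw [pvRepl]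

lemma pvGoEq (old new : List Char) (hold : old ≠ []) :
    ∀ (fuel : Nat) (l acc : List Char), l.length ≤ fuel →
      PySem.Chars.replace.go old new fuel l acc = acc.reverse ++ pvRepl old new l := by
  intro fuel
  induction fuel with
  | zero =>
    intro l acc h
    have : l = [] := by cases l <;> simp_all
    subst this
    simp [PySem.Chars.replace.go, pvRepl_nil]
  | succ n ih =>
    intro l acc h
    cases l with
    | nil => simp [PySem.Chars.replace.go, pvRepl_nil]
    | cons c t =>
      by_cases hp : old.isPrefixOf (c :: t) = true
      · have hdrop : (c :: t).drop old.length = t.drop (old.length - 1) := by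
          cases old with
          | nil => simp_all
          | cons a as => simp
        rw [PySem.Chars.replace.go]
        simp only [hp, if_pos]
        rw [hdrop]
        rw [ih _ _ (by
          simp only [List.length_drop]
          simp only [List.length_cons] at h; omega)]
        rw [pvRepl_cons]
        simp [hp]
      · rw [PySem.Chars.replace.go]
        simp only [hp]
        rw [ih t (c :: acc) (by simp only [List.length_cons] at h; omega)]
        rw [pvRepl_cons]
        simp [hp]

lemma pvReplaceEq (s old new : List Char) (hold : old ≠ []) :
    PySem.Chars.replace s old new = pvRepl old new s := by
  rw [PySem.Chars.replace]
  rw [if_neg (by simp [List.isEmpty_iff, hold])]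
  rw [pvGoEq old new hold s.length s [] le_rfl]
  simp

lemma pvRepl_cons_neg (old new : List Char) (c : Char) (t : List Char)
    (h : old.isPrefixOf (c :: t) = false) :
    pvRepl old new (c :: t) = c :: pvRepl old new t := by
  rw [pvRepl_cons, if_neg (by simp [h])]

lemma pvRepl_emit (kh : Char) (kt new X : List Char) :
    pvRepl (kh :: kt) new ((kh :: kt) ++ X) = new ++ pvRepl (kh :: kt) new X := by
  rw [List.cons_append, pvRepl_cons]
  rw [if_pos (by simp [List.isPrefixOf_iff_prefix])]
  simp

lemma pvRepl_pass (kh : Char) (kt new : List Char) (w : List Char)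
    (hw : ∀ c ∈ w, c ≠ kh) (X : List Char) :
    pvRepl (kh :: kt) new (w ++ X) = w ++ pvRepl (kh :: kt) new X := by
  induction w with
  | nil => simp
  | cons a w' ih =>
    have ha : a ≠ kh := hw a (by simp)
    rw [List.cons_append, pvRepl_cons_neg _ _ _ _ (by simp [List.isPrefixOf]; intro h; exact absurd h.symm ha)]
    rw [ih (fun c hc => hw c (by simp [hc]))]
    simp

lemma pvRepl_prefix (kh : Char) (kt vt : List Char) (w : List Char)
    (hw : ∀ c ∈ w, c ≠ kh) :
    ∀ s : List Char, w.isPrefixOf (pvRepl (kh :: kt) (kh :: vt) s) = w.isPrefixOf s := by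
  induction w with
  | nil => intro s; simp
  | cons a w' ih =>
    intro s
    have ha : a ≠ kh := hw a (by simp)
    have hbeq : (a == kh) = false := by simp [ha]
    cases s with
    | nil => simp [pvRepl_nil]
    | cons c t =>
      cases hp : (kh :: kt).isPrefixOf (c :: t) with
      | true =>
        have hc : c = kh := by
          simp [List.isPrefixOf] at hp; exact hp.1.symm
        rw [pvRepl_cons, if_pos hp]
        simp only [List.cons_append, List.isPrefixOf, hbeq, hc]
        simp
      | false =>
        rw [pvRepl_cons_neg _ _ _ _ hp]
        simp only [List.isPrefixOf]
        rw [ih (fun c hc => hw c (by simp [hc])) t]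

def pvComp (l : List Char) : List Char :=
  pvRepl ['w','o','n','\'','t'] ['w','i','l','l',' ','n','o','t']
    (pvRepl ['c','a','n','\'','t'] ['c','a','n','n','o','t']
      (pvRepl ['d','o','n','\'','t'] ['d','o',' ','n','o','t']
        (pvRepl ['i','t','\'','s'] ['i','t',' ','i','s'] l)))

lemma pvScan_cons (c : Char) (t : List Char) :
    pvScan (c :: t) =
      if ['i','t','\'','s'].isPrefixOf (c :: t) then
        ['i','t',' ','i','s'] ++ pvScan (t.drop 3)
      else if ['d','o','n','\'','t'].isPrefixOf (c :: t) then
        ['d','o',' ','n','o','t'] ++ pvScan (t.drop 4)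
      else if ['c','a','n','\'','t'].isPrefixOf (c :: t) then
        ['c','a','n','n','o','t'] ++ pvScan (t.drop 4)
      else if ['w','o','n','\'','t'].isPrefixOf (c :: t) then
        ['w','i','l','l',' ','n','o','t'] ++ pvScan (t.drop 4)
      else c :: pvScan t := by
  rw [pvScan]

lemma pvScanEq : ∀ (n : Nat) (l : List Char), l.length ≤ n → pvScan l = pvComp l := by
  intro n
  induction n with
  | zero =>
    intro l h
    have : l = [] := by cases l <;> simp_all
    subst this
    simp [pvScan, pvComp, pvRepl_nil]
  | succ n ih =>
    intro l h
    cases l with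
    | nil => simp [pvScan, pvComp, pvRepl_nil]
    | cons c t =>
      by_cases h1 : (['i','t','\'','s'].isPrefixOf (c :: t)) = true
      · obtain ⟨r, hr⟩ := List.isPrefixOf_iff_prefix.mp h1
        rw [← hr]
        have hlen : r.length ≤ n := by
          have hl := congrArg List.length hr
          simp only [List.length_append, List.length_cons] at hl
          simp only [List.length_cons] at h
          omega
        have hscan : pvScan (['i','t','\'','s'] ++ r) = ['i','t',' ','i','s'] ++ pvScan r := by
          simp only [List.cons_append, List.nil_append]
          rw [pvScan_cons]
          simp [List.isPrefixOf]
        rw [hscan, ih r hlen]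
        unfold pvComp
        rw [pvRepl_emit 'i' ['t','\'','s'] ['i','t',' ','i','s'] r]
        rw [pvRepl_pass 'd' ['o','n','\'','t'] _ ['i','t',' ','i','s'] (by simp)]
        rw [pvRepl_pass 'c' ['a','n','\'','t'] _ ['i','t',' ','i','s'] (by simp)]
        rw [pvRepl_pass 'w' ['o','n','\'','t'] _ ['i','t',' ','i','s'] (by simp)]
      · by_cases h2 : (['d','o','n','\'','t'].isPrefixOf (c :: t)) = true
        · obtain ⟨r, hr⟩ := List.isPrefixOf_iff_prefix.mp h2
          rw [← hr]
          have hlen : r.length ≤ n := by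
            have hl := congrArg List.length hr
            simp only [List.length_append, List.length_cons] at hl
            simp only [List.length_cons] at h
            omega
          have hscan : pvScan (['d','o','n','\'','t'] ++ r) = ['d','o',' ','n','o','t'] ++ pvScan r := by
            simp only [List.cons_append, List.nil_append]
            rw [pvScan_cons]
            simp [List.isPrefixOf]
          rw [hscan, ih r hlen]
          unfold pvComp
          rw [pvRepl_pass 'i' ['t','\'','s'] _ ['d','o','n','\'','t'] (by simp)]
          rw [pvRepl_emit 'd' ['o','n','\'','t'] ['d','o',' ','n','o','t'] _]
          rw [pvRepl_pass 'c' ['a','n','\'','t'] _ ['d','o',' ','n','o','t'] (by simp)]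
          rw [pvRepl_pass 'w' ['o','n','\'','t'] _ ['d','o',' ','n','o','t'] (by simp)]
        · by_cases h3 : (['c','a','n','\'','t'].isPrefixOf (c :: t)) = true
          · obtain ⟨r, hr⟩ := List.isPrefixOf_iff_prefix.mp h3
            rw [← hr]
            have hlen : r.length ≤ n := by
              have hl := congrArg List.length hr
              simp only [List.length_append, List.length_cons] at hl
              simp only [List.length_cons] at h
              omega
            have hscan : pvScan (['c','a','n','\'','t'] ++ r) = ['c','a','n','n','o','t'] ++ pvScan r := by
              simp only [List.cons_append, List.nil_append]
              rw [pvScan_cons]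
              simp [List.isPrefixOf]
            rw [hscan, ih r hlen]
            unfold pvComp
            rw [pvRepl_pass 'i' ['t','\'','s'] _ ['c','a','n','\'','t'] (by simp)]
            rw [pvRepl_pass 'd' ['o','n','\'','t'] _ ['c','a','n','\'','t'] (by simp)]
            rw [pvRepl_emit 'c' ['a','n','\'','t'] ['c','a','n','n','o','t'] _]
            rw [pvRepl_pass 'w' ['o','n','\'','t'] _ ['c','a','n','n','o','t'] (by simp)]
          · by_cases h4 : (['w','o','n','\'','t'].isPrefixOf (c :: t)) = true
            · obtain ⟨r, hr⟩ := List.isPrefixOf_iff_prefix.mp h4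
              rw [← hr]
              have hlen : r.length ≤ n := by
                have hl := congrArg List.length hr
                simp only [List.length_append, List.length_cons] at hl
                simp only [List.length_cons] at h
                omega
              have hscan : pvScan (['w','o','n','\'','t'] ++ r) = ['w','i','l','l',' ','n','o','t'] ++ pvScan r := by
                simp only [List.cons_append, List.nil_append]
                rw [pvScan_cons]
                simp [List.isPrefixOf]
              rw [hscan, ih r hlen]
              unfold pvComp
              rw [pvRepl_pass 'i' ['t','\'','s'] _ ['w','o','n','\'','t'] (by simp)]
              rw [pvRepl_pass 'd' ['o','n','\'','t'] _ ['w','o','n','\'','t'] (by simp)]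
              rw [pvRepl_pass 'c' ['a','n','\'','t'] _ ['w','o','n','\'','t'] (by simp)]
              rw [pvRepl_emit 'w' ['o','n','\'','t'] ['w','i','l','l',' ','n','o','t'] _]
            · -- no key matches at this position
              have hlen : t.length ≤ n := by simp only [List.length_cons] at h; omega
              have e1 : (['i','t','\'','s'].isPrefixOf (c :: t)) = false := by
                exact eq_false_of_ne_true h1
              have e2 : (['d','o','n','\'','t'].isPrefixOf (c :: t)) = false := by
                exact eq_false_of_ne_true h2
              have e3 : (['c','a','n','\'','t'].isPrefixOf (c :: t)) = false := by
                exact eq_false_of_ne_true h3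
              have e4 : (['w','o','n','\'','t'].isPrefixOf (c :: t)) = false := by
                exact eq_false_of_ne_true h4
              rw [pvScan_cons, if_neg (by simp [e1]), if_neg (by simp [e2]),
                if_neg (by simp [e3]), if_neg (by simp [e4])]
              unfold pvComp
              have p1 := pvRepl_cons_neg ['i','t','\'','s'] ['i','t',' ','i','s'] c t e1
              have q2 : (['d','o','n','\'','t'].isPrefixOf
                  (pvRepl ['i','t','\'','s'] ['i','t',' ','i','s'] (c :: t))) = false := by
                rw [pvRepl_prefix 'i' ['t','\'','s'] ['t',' ','i','s'] _ (by simp)]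
                exact e2
              have q3 : (['c','a','n','\'','t'].isPrefixOf
                  (pvRepl ['d','o','n','\'','t'] ['d','o',' ','n','o','t']
                    (pvRepl ['i','t','\'','s'] ['i','t',' ','i','s'] (c :: t)))) = false := by
                rw [pvRepl_prefix 'd' ['o','n','\'','t'] ['o',' ','n','o','t'] _ (by simp)]
                rw [pvRepl_prefix 'i' ['t','\'','s'] ['t',' ','i','s'] _ (by simp)]
                exact e3
              have q4 : (['w','o','n','\'','t'].isPrefixOf
                  (pvRepl ['c','a','n','\'','t'] ['c','a','n','n','o','t']
                    (pvRepl ['d','o','n','\'','t'] ['d','o',' ','n','o','t']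
                      (pvRepl ['i','t','\'','s'] ['i','t',' ','i','s'] (c :: t))))) = false := by
                rw [pvRepl_prefix 'c' ['a','n','\'','t'] ['a','n','n','o','t'] _ (by simp)]
                rw [pvRepl_prefix 'd' ['o','n','\'','t'] ['o',' ','n','o','t'] _ (by simp)]
                rw [pvRepl_prefix 'i' ['t','\'','s'] ['t',' ','i','s'] _ (by simp)]
                exact e4
              rw [p1] at q2 q3 q4
              rw [p1]
              rw [pvRepl_cons_neg _ _ _ _ q2] at q3 q4
              rw [pvRepl_cons_neg _ _ _ _ q2]
              rw [pvRepl_cons_neg _ _ _ _ q3] at q4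
              rw [pvRepl_cons_neg _ _ _ _ q3]
              rw [pvRepl_cons_neg _ _ _ _ q4]
              rw [ih t hlen]
              rfl

-- ===== VERDICT (by name: the statement is the Claim_ definition above) =====
theorem style_variation_py_spec : Claim_equal_style_variation_py := by
  intro text _
  unfold Spec_style_variation_py style_variation_py style_variation_py_alt
  refine String.toList_inj.mp ?_
  simp only [List.foldl, PySem.Str.toList_replace]
  rw [pvReplaceEq _ _ _ (by decide), pvReplaceEq _ _ _ (by decide),
    pvReplaceEq _ _ _ (by decide), pvReplaceEq _ _ _ (by decide)]
  rw [pvScanEq text.toList.length text.toList le_rfl]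
  simp only [String.toList_ofList]
  rw [show "it's".toList = ['i','t','\'','s'] from rfl,
    show "it is".toList = ['i','t',' ','i','s'] from rfl,
    show "don't".toList = ['d','o','n','\'','t'] from rfl,
    show "do not".toList = ['d','o',' ','n','o','t'] from rfl,
    show "can't".toList = ['c','a','n','\'','t'] from rfl,
    show "cannot".toList = ['c','a','n','n','o','t'] from rfl,
    show "won't".toList = ['w','o','n','\'','t'] from rfl,
    show "will not".toList = ['w','i','l','l',' ','n','o','t'] from rfl]
  rfl
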